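-- pv_equiv track=rewrite | github.com/Josep1990/cloud-ca | mp3-play/main.py | sort_playlist
-- ===== SOURCE A (Python) =====
-- def sort_playlist(playlist_songs):
--     playlists = {}
--     for playlist_song in playlist_songs:
--         playlist_name = playlist_song['playlist_name']
--         song_name = playlist_song['song_name']
--
--         if playlist_name in playlists:
--             playlists[playlist_name].append(song_name)
--         else:
--             playlists[playlist_name] = [song_name]
--     return playlists
-- ===== SOURCE B (Python) =====
-- def sort_playlist(playlist_songs):
--     # Collect the distinct playlist names in first-appearance order,
--     # then build each group with one comprehension pass per name.
--     names = []
--     for playlist_song in playlist_songs: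
--         name = playlist_song['playlist_name']
--         if name not in names:
--             names.append(name)
--     return {name: [s['song_name'] for s in playlist_songs
--                    if s['playlist_name'] == name]
--             for name in names}
-- ===== Notes on version B (the rewrite author's own statement) =====
-- stated objective: alternative
-- what changed: B replaces A's single-pass incremental dict-of-lists (lookup-and-append per item) with a two-phase scheme: first collect the distinct playlist names in order of first appearance, then build each group by an independent filtering pass over the whole input.
import Mathlib
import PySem

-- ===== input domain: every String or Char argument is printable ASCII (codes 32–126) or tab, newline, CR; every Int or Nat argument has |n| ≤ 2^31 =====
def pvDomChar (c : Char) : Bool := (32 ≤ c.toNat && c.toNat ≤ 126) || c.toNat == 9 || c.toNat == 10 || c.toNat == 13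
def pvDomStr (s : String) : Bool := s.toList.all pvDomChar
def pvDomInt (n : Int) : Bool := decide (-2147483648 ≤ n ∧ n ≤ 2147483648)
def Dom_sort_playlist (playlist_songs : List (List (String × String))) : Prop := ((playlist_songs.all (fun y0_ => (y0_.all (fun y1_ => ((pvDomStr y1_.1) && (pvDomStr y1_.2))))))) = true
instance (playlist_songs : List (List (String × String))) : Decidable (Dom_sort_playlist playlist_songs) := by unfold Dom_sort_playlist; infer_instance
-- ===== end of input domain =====

-- B groups by first collecting the distinct playlist names in order and then one filtering pass
-- per name, instead of A's incremental dict-of-lists; same result, alternative decomposition.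

-- ===== PORT A =====
def sort_playlist (playlist_songs : List (List (String × String))) : List (String × List String) :=
  (playlist_songs.foldl
    (fun playlists playlist_song =>
      let playlist_name := ((PySem.Dict.mk playlist_song).get? "playlist_name").getD ""
      let song_name := ((PySem.Dict.mk playlist_song).get? "song_name").getD ""
      if playlists.contains playlist_name then
        -- playlists[playlist_name].append(song_name)
        playlists.modify playlist_name [] (fun songs => songs ++ [song_name])
      else
        playlists.insert playlist_name [song_name])
    PySem.Dict.empty).items

-- ===== PORT B =====
def sort_playlist_alt (playlist_songs : List (List (String × String))) : List (String × List String) :=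
  let names := playlist_songs.foldl
    (fun names playlist_song =>
      let name := ((PySem.Dict.mk playlist_song).get? "playlist_name").getD ""
      if name ∈ names then names else names ++ [name]) []
  names.map (fun name =>
    (name,
      (playlist_songs.filter
          (fun s => ((PySem.Dict.mk s).get? "playlist_name").getD "" == name)).map
        (fun s => ((PySem.Dict.mk s).get? "song_name").getD "")))

-- ===== PRECONDITION & SPEC =====
-- Pre_ excludes exactly the inputs where Python A raises KeyError: an entry missing the
-- 'playlist_name' or 'song_name' key.
def Pre_sort_playlist (playlist_songs : List (List (String × String))) : Prop :=
  ∀ s ∈ playlist_songs,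
    ((PySem.Dict.mk s).get? "playlist_name").isSome = true ∧
    ((PySem.Dict.mk s).get? "song_name").isSome = true
instance (playlist_songs : List (List (String × String))) : Decidable (Pre_sort_playlist playlist_songs) := by unfold Pre_sort_playlist; infer_instance

def pvWitness_sort_playlist : (List (List (String × String))) :=
  [[("playlist_name", "road trip"), ("song_name", "Hey Jude")],
   [("playlist_name", "road trip"), ("song_name", "Let It Be")],
   [("playlist_name", "gym"), ("song_name", "Eye of the Tiger")]]

def Spec_sort_playlist (playlist_songs : List (List (String × String))) (out : List (String × List String)) : Prop := out = sort_playlist_alt playlist_songs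
instance (playlist_songs : List (List (String × String))) (out : List (String × List String)) : Decidable (Spec_sort_playlist playlist_songs out) := by unfold Spec_sort_playlist; infer_instance

-- ===== CLAIM (what is proved, stated in full; the proofs are below) =====
def Claim_equal_sort_playlist : Prop := ∀ (playlist_songs : List (List (String × String))), Dom_sort_playlist playlist_songs → Pre_sort_playlist playlist_songs → Spec_sort_playlist playlist_songs (sort_playlist playlist_songs)

-- ===== LEMMAS AND PROOFS =====
def pvName (s : List (String × String)) : String :=
  ((PySem.Dict.mk s).get? "playlist_name").getD ""
def pvSong (s : List (String × String)) : String :=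
  ((PySem.Dict.mk s).get? "song_name").getD ""
def pvPair (s : List (String × String)) : String × String := (pvName s, pvSong s)

-- A's if/else branch is exactly a `modify` with default []
theorem pv_step_eq (d : PySem.Dict String (List String)) (n s : String) :
    (if d.contains n then d.modify n [] (· ++ [s]) else d.insert n [s]) =
      d.modify n [] (· ++ [s]) := by
  by_cases h : d.contains n = true
  · simp [h]
  · have h' : d.contains n = false := by simpa using h
    simp [h', PySem.Dict.modify, PySem.Dict.getD_of_not_contains]

theorem pv_A_as_modify (ps : List (List (String × String))) :
    sort_playlist ps =
      (ps.foldl (fun d s => d.modify (pvName s) [] (· ++ [pvSong s]))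
        PySem.Dict.empty).items := by
  unfold sort_playlist
  congr 1
  have hf : (fun (playlists : PySem.Dict String (List String)) playlist_song =>
      let playlist_name := ((PySem.Dict.mk playlist_song).get? "playlist_name").getD ""
      let song_name := ((PySem.Dict.mk playlist_song).get? "song_name").getD ""
      if playlists.contains playlist_name then
        playlists.modify playlist_name [] (fun songs => songs ++ [song_name])
      else
        playlists.insert playlist_name [song_name]) =
      (fun (d : PySem.Dict String (List String)) s =>
        d.modify (pvName s) [] (· ++ [pvSong s])) := by
    funext d s
    exact pv_step_eq d (pvName s) (pvSong s)
  rw [hf]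

theorem pv_B_closed (ps : List (List (String × String))) :
    sort_playlist_alt ps =
      (PySem.Set.ofList (ps.map pvName)).map (fun n =>
        (n, (ps.filter (fun s => pvName s == n)).map pvSong)) := by
  unfold sort_playlist_alt
  have hn : ps.foldl
      (fun names playlist_song =>
        let name := ((PySem.Dict.mk playlist_song).get? "playlist_name").getD ""
        if name ∈ names then names else names ++ [name]) [] =
      PySem.Set.ofList (ps.map pvName) := by
    have hf : (fun (names : List String) playlist_song =>
        let name := ((PySem.Dict.mk playlist_song).get? "playlist_name").getD ""
        if name ∈ names then names else names ++ [name]) =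
        (fun names s => PySem.Set.add names (pvName s)) := by
      funext names s
      exact (PySem.Set.add_eq_ite names (pvName s)).symm
    rw [hf, ← PySem.Set.update_map_eq_foldl_add, PySem.Set.update_nil_left]
  rw [hn]
  rfl

theorem pv_main (ps : List (List (String × String))) :
    sort_playlist ps = sort_playlist_alt ps := by
  rw [pv_A_as_modify, pv_B_closed]
  have hnodup : (ps.foldl (fun d s => d.modify (pvName s) [] (· ++ [pvSong s]))
      PySem.Dict.empty).keys.Nodup :=
    PySem.Dict.nodup_keys_foldl_modify_key ps pvName []
      (fun _ s => (· ++ [pvSong s])) PySem.Dict.empty PySem.Dict.nodup_keys_empty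
  rw [PySem.Dict.items_eq_map_keys _ hnodup []]
  have hkeys : (ps.foldl (fun d s => d.modify (pvName s) [] (· ++ [pvSong s]))
      PySem.Dict.empty).keys = PySem.Set.ofList (ps.map pvName) := by
    rw [PySem.Dict.keys_foldl_modify_key]
    simp [PySem.Set.update_nil_left]
  rw [hkeys]
  apply List.map_congr_left
  intro n _
  congr 1
  have hfold : ps.foldl (fun d s => d.modify (pvName s) [] (· ++ [pvSong s]))
      PySem.Dict.empty =
      (ps.map pvPair).foldl (fun d p => d.modify p.1 [] (· ++ [p.2]))
        PySem.Dict.empty := by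
    rw [List.foldl_map]
    rfl
  rw [hfold, PySem.Dict.getD_foldl_modify_append]
  rw [List.filter_map, List.map_map]
  simp [Function.comp_def, pvPair]

-- ===== VERDICT (by name: the statement is the Claim_ definition above) =====
theorem sort_playlist_spec : Claim_equal_sort_playlist := by
  intro ps _ _
  unfold Spec_sort_playlist
  exact pv_main ps
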